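-- pv_equiv track=rewrite | github.com/B-VAMSHIDHARREDDY/ShelfIdentification | shelf_api/views.py | identify_shapes
-- ===== SOURCE A (Python) =====
-- def identify_shapes(result_grid):
--     # Function to identify shapes of '1's in the input grid
--     shapes = []  # List to store the identified shapes with positions
--
--     # Helper function to determine if a cluster is a rectangle
--     def is_rectangle(cluster):
--         rows = len(cluster)
--         cols = len(cluster[0])
--         return all(sum(cluster[i]) == sum(cluster[0]) for i in range(rows)) and all(
--             sum(cluster[i][j] for i in range(rows)) == rows for j in range(cols))
--
--     # Helper function to classify a cluster
--     def classify_shape(cluster):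
--         rows = len(cluster)
--         cols = len(cluster[0])
--         if rows == 1 and cols == 1:
--             return "Point"
--         elif rows == 1:
--             return "Horizontal Line"
--         elif cols == 1:
--             return "Vertical Rectangle"
--         elif is_rectangle(cluster):
--             if rows == cols:
--                 return "Square"
--             elif rows > cols:
--                 return "Vertical Rectangle"
--             else:
--                 return "Horizontal Rectangle"
--         else:
--             return "Polygon"
--
--     # Iterate through the input grid
--     for row in range(len(result_grid)):
--         for col in range(len(result_grid[0])):
--             if result_grid[row][col] == 1:
--                 # Find the connected cluster of '1's
--                 cluster = []
--                 stack = [(row, col)]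
--                 while stack:
--                     r, c = stack.pop()
--                     if 0 <= r < len(result_grid) and 0 <= c < len(result_grid[0]) and result_grid[r][c] == 1:
--                         cluster.append((r, c))
--                         result_grid[r][c] = 0  # Mark as visited
--                         stack.extend([(r - 1, c), (r + 1, c), (r, c - 1), (r, c + 1)])
--
--                 # Convert the cluster coordinates to a binary grid
--                 min_row = min(row for row, _ in cluster)
--                 max_row = max(row for row, _ in cluster)
--                 min_col = min(col for _, col in cluster)
--                 max_col = max(col for _, col in cluster)
--                 cluster_grid = [[0] * (max_col - min_col + 1) for _ in range(max_row - min_row + 1)]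
--                 for r, c in cluster:
--                     cluster_grid[r - min_row][c - min_col] = 1
--
--                 # Classify the shape of the cluster
--                 shape_type = classify_shape(cluster_grid)
--
--                 # Calculate the position of the shape within the input grid
--                 top_left = (min_row, min_col)
--                 bottom_right = (max_row, max_col)
--                 center = ((min_row + max_row) // 2, (min_col + max_col) // 2)
--
--                 # Determine the location based on the position
--                 if center[0] < len(result_grid) // 2:
--                     location = "Top"
--                 elif center[0] > len(result_grid) // 2:
--                     location = "Bottom"
--                 else:
--                     location = ""
--
--                 if center[1] < len(result_grid[0]) // 2:
--                     location = " Left"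
--                 elif center[1] > len(result_grid[0]) // 2:
--                     location = " Right"
--
--                 # Store the shape information including its position and location
--                 shape_info = {
--                     "Shape": shape_type,
--                     "Location": location.strip()  # Remove leading/trailing spaces
--                 }
--
--                 shapes.append(shape_info)
--
--     return shapes
-- ===== SOURCE B (Python) =====
-- def identify_shapes(result_grid):
--     # Alternative exact re-implementation: the grid is converted once into a
--     # coordinate set of the 1-cells; clusters are consumed from that set (no
--     # in-place grid mutation, unlike A), tracking count and bounding box, and
--     # each cluster is classified arithmetically (full rectangle iff
--     # count == bbox area) with no per-cluster binary grid or row/column sums.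
--     H = len(result_grid)
--     W = len(result_grid[0]) if result_grid else 0
--     cells = [(r, c) for r in range(H) for c in range(W) if result_grid[r][c] == 1]
--     ones = set(cells)
--     shapes = []
--     for seed in cells:
--         if seed in ones:
--             count = 0
--             minr = maxr = seed[0]
--             minc = maxc = seed[1]
--             stack = [seed]
--             while stack:
--                 p = stack.pop()
--                 if p in ones:
--                     ones.discard(p)
--                     count += 1
--                     r, c = p
--                     if r < minr: minr = r
--                     if r > maxr: maxr = r
--                     if c < minc: minc = c
--                     if c > maxc: maxc = c
--                     stack.extend([(r - 1, c), (r + 1, c), (r, c - 1), (r, c + 1)])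
--             h = maxr - minr + 1
--             w = maxc - minc + 1
--             if h == 1 and w == 1:
--                 shape_type = "Point"
--             elif h == 1:
--                 shape_type = "Horizontal Line"
--             elif w == 1:
--                 shape_type = "Vertical Rectangle"
--             elif count == h * w:
--                 shape_type = "Square" if h == w else ("Vertical Rectangle" if h > w else "Horizontal Rectangle")
--             else:
--                 shape_type = "Polygon"
--             cr = (minr + maxr) // 2
--             cc = (minc + maxc) // 2
--             if cc < W // 2:
--                 location = "Left"
--             elif cc > W // 2:
--                 location = "Right"
--             elif cr < H // 2:
--                 location = "Top"
--             elif cr > H // 2: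
--                 location = "Bottom"
--             else:
--                 location = ""
--             shapes.append({"Shape": shape_type, "Location": location})
--     return shapes
-- ===== Notes on version B (the rewrite author's own statement) =====
-- stated objective: alternative
-- what changed: B replaces A's in-place grid mutation with a precomputed row-major list and set of 1-cell coordinates, consumes each cluster from that set while tracking count and bounding box, and classifies arithmetically (rectangle iff count == bbox area) instead of materialising a per-cluster binary bounding-box grid and checking row/column sums; the location comes from one direct if-chain instead of A's build-then-overwrite-then-strip string dance.
import Mathlib
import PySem

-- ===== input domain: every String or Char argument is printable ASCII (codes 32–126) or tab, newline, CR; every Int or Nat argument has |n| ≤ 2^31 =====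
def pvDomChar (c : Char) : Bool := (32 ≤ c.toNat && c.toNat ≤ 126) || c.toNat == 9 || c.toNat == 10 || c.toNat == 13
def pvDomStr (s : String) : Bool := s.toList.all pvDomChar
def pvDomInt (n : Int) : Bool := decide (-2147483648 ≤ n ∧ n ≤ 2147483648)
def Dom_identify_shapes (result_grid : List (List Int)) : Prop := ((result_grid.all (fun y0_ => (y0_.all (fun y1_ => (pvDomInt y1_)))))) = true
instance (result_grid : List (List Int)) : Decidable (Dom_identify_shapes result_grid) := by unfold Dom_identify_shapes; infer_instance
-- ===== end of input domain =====

-- B works on a precomputed coordinate set of the 1-cells (A mutates result_grid in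
-- place, B never touches it — equivalence is about the RETURN value) and classifies
-- each cluster arithmetically (rectangle iff count = bbox area) instead of building
-- A's per-cluster binary bounding-box grid with row/column-sum checks.

-- ===== PORT A =====
-- grid primitives of A: A reads and writes result_grid[r][c] in place.  At every
-- use site the indices are guarded 0 ≤ r < len(grid), 0 ≤ c < len(grid[0]), and a
-- read equal to 1 (≠ the getD default 0) forces both indices in range, so
-- getD / set through .toNat is exact there.
def pvCell (g : List (List Int)) (r c : Int) : Int := (g.getD r.toNat []).getD c.toNat 0

def pvSet0 (g : List (List Int)) (r c : Int) : List (List Int) :=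
  g.set r.toNat ((g.getD r.toNat []).set c.toNat 0)

-- number of 1-cells: the termination measure of A's while loop
def pvOnes (g : List (List Int)) : Nat := (g.map (fun row => row.count 1)).sum

theorem pvRowCount_set_lt (row : List Int) (j : Nat) (h : row.getD j 0 = 1) :
    (row.set j 0).count 1 < row.count 1 := by
  induction row generalizing j with
  | nil => simp at h
  | cons x t ih =>
    cases j with
    | zero =>
      simp [List.getD] at h
      subst h
      simp
    | succ j =>
      have := ih j (by simpa [List.getD] using h)
      simp only [List.set, List.count_cons]
      omega

theorem pvOnes_set0_lt (g : List (List Int)) (r c : Int) (h : pvCell g r c = 1) :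
    pvOnes (pvSet0 g r c) < pvOnes g := by
  unfold pvCell at h
  unfold pvSet0 pvOnes
  generalize r.toNat = i at *
  induction g generalizing i with
  | nil => simp [List.getD] at h
  | cons row t ih =>
    cases i with
    | zero =>
      simp only [List.getD] at h ⊢
      simp only [List.set, List.map, List.sum_cons]
      have := pvRowCount_set_lt row c.toNat (by simpa using h)
      simp at this ⊢
      omega
    | succ i =>
      simp only [List.getD, List.getElem?_cons_succ] at h
      have := ih i h
      simp only [List.getD] at this
      simp only [List.set, List.map, List.sum_cons, List.getD, List.getElem?_cons_succ]
      omega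

-- Python min()/max() on a nonempty sequence (the clusters below are never empty)
def pvMin1 : List Int → Int
  | [] => 0
  | h :: t => t.foldl min h

def pvMax1 : List Int → Int
  | [] => 0
  | h :: t => t.foldl max h

-- Python sum()
def pvSum (xs : List Int) : Int := xs.foldl (· + ·) 0

-- the while loop of A: DFS stack (kept reversed: Python pops from the END and
-- extends at the end, so the head here is the element .pop() returns), cluster
-- accumulated by append.  H = len(result_grid), W = len(result_grid[0]) are passed
-- once: cell assignment never changes any row length, so they are loop constants.
def floodA (H W : Int) (g : List (List Int)) (stack cl : List (Int × Int)) :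
    List (List Int) × List (Int × Int) :=
  match stack with
  | [] => (g, cl)
  | (r, c) :: rest =>
    if h : 0 ≤ r ∧ r < H ∧ 0 ≤ c ∧ c < W ∧ pvCell g r c = 1 then
      floodA H W (pvSet0 g r c) ((r, c + 1) :: (r, c - 1) :: (r + 1, c) :: (r - 1, c) :: rest)
        (cl ++ [(r, c)])
    else
      floodA H W g rest cl
  termination_by (pvOnes g, stack.length)
  decreasing_by
  · exact Prod.Lex.left _ _ (pvOnes_set0_lt g r c h.2.2.2.2)
  · exact Prod.Lex.right _ (by simp)

-- cluster_grid = [[0]*(max_col-min_col+1) for _ in range(max_row-min_row+1)]; then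
-- for r, c in cluster: cluster_grid[r-min_row][c-min_col] = 1
def pvCGupd (mr mc : Int) (cg : List (List Int)) (p : Int × Int) : List (List Int) :=
  cg.set (p.1 - mr).toNat ((cg.getD (p.1 - mr).toNat []).set (p.2 - mc).toNat 1)

def pvBuildCG (mr mc : Int) (R C : Nat) (cl : List (Int × Int)) : List (List Int) :=
  cl.foldl (pvCGupd mr mc) (List.replicate R (List.replicate C 0))

-- helper is_rectangle(cluster)
def pvIsRectA (cg : List (List Int)) : Bool :=
  let rows := cg.length
  let cols := (cg.headI).length
  ((List.range rows).all (fun i => pvSum (cg.getD i []) == pvSum (cg.getD 0 []))) &&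
  ((List.range cols).all (fun j =>
      pvSum ((List.range rows).map (fun i => (cg.getD i []).getD j 0)) == (rows : Int)))

-- helper classify_shape(cluster)
def pvClassifyA (cg : List (List Int)) : String :=
  let rows := cg.length
  let cols := (cg.headI).length
  if rows = 1 ∧ cols = 1 then "Point"
  else if rows = 1 then "Horizontal Line"
  else if cols = 1 then "Vertical Rectangle"
  else if pvIsRectA cg then
    if rows = cols then "Square"
    else if rows > cols then "Vertical Rectangle"
    else "Horizontal Rectangle"
  else "Polygon"

-- location string of A: first set from the row comparison, then OVERWRITTEN by the
-- column comparison, finally .strip()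
def pvLocA (H W cr cc : Int) : String :=
  let l1 : String :=
    if cr < PySem.Int.floordiv H 2 then "Top"
    else if cr > PySem.Int.floordiv H 2 then "Bottom"
    else ""
  let l2 : String :=
    if cc < PySem.Int.floordiv W 2 then " Left"
    else if cc > PySem.Int.floordiv W 2 then " Right"
    else l1
  PySem.Str.strip l2

-- body of the doubly nested for loop of A (state = (grid, shapes))
def pvInnerA (H W : Nat) (st : List (List Int) × List (List (String × String)))
    (row col : Nat) : List (List Int) × List (List (String × String)) :=
  if (st.1.getD row []).getD col 0 = 1 then
    let res := floodA (H : Int) (W : Int) st.1 [((row : Int), (col : Int))] []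
    let cl := res.2
    let mr := pvMin1 (cl.map Prod.fst)
    let Mr := pvMax1 (cl.map Prod.fst)
    let mc := pvMin1 (cl.map Prod.snd)
    let Mc := pvMax1 (cl.map Prod.snd)
    let cg := pvBuildCG mr mc (Mr - mr + 1).toNat (Mc - mc + 1).toNat cl
    let shape := pvClassifyA cg
    let loc := pvLocA (H : Int) (W : Int)
      (PySem.Int.floordiv (mr + Mr) 2) (PySem.Int.floordiv (mc + Mc) 2)
    (res.1, st.2 ++ [[("Shape", shape), ("Location", loc)]])
  else st

def identify_shapes (result_grid : List (List Int)) : List (List (String × String)) :=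
  let H := result_grid.length
  let W := (result_grid.headI).length
  ((List.range H).foldl
    (fun st row => (List.range W).foldl (fun st col => pvInnerA H W st row col) st)
    (result_grid, [])).2

-- ===== PORT B =====
-- cells = [(r, c) for r in range(H) for c in range(W) if result_grid[r][c] == 1]
def pvBCells (g : List (List Int)) (H W : Nat) : List (Int × Int) :=
  (List.range H).flatMap (fun r =>
    ((List.range W).filter (fun c => (g.getD r []).getD c 0 == 1)).map
      (fun (c : Nat) => ((r : Int), (c : Int))))

-- the five loop variables count/minr/maxr/minc/maxc of B's while loop
structure PvBStats where
  cnt : Int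
  top : Int
  bot : Int
  lft : Int
  rgt : Int
deriving DecidableEq, Repr

-- B's while loop: pops the stack, consuming 1-cells from the coordinate set
-- `ones` and folding them into the running statistics
def pvBFlood (ones : PySem.Set (Int × Int)) (stack : List (Int × Int)) (s : PvBStats) :
    PySem.Set (Int × Int) × PvBStats :=
  match stack with
  | [] => (ones, s)
  | p :: rest =>
    if hmem : p ∈ ones then
      pvBFlood (PySem.Set.discard ones p)
        ((p.1, p.2 + 1) :: (p.1, p.2 - 1) :: (p.1 + 1, p.2) :: (p.1 - 1, p.2) :: rest)
        { cnt := s.cnt + 1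
          top := if p.1 < s.top then p.1 else s.top
          bot := if p.1 > s.bot then p.1 else s.bot
          lft := if p.2 < s.lft then p.2 else s.lft
          rgt := if p.2 > s.rgt then p.2 else s.rgt }
    else
      pvBFlood ones rest s
  termination_by (ones.length, stack.length)
  decreasing_by
  · exact Prod.Lex.left _ _
      (List.length_filter_lt_length_iff_exists.mpr ⟨p, hmem, by simp⟩)
  · exact Prod.Lex.right _ (by simp)

-- arithmetic classification: full rectangle iff count = bbox area
def pvBClassify (count h w : Int) : String :=
  if h = 1 ∧ w = 1 then "Point"
  else if h = 1 then "Horizontal Line"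
  else if w = 1 then "Vertical Rectangle"
  else if count = h * w then
    if h = w then "Square"
    else if h > w then "Vertical Rectangle"
    else "Horizontal Rectangle"
  else "Polygon"

-- direct if-chain for the location (column test first, as it wins in A)
def pvBLoc (H W cr cc : Int) : String :=
  if cc < PySem.Int.floordiv W 2 then "Left"
  else if cc > PySem.Int.floordiv W 2 then "Right"
  else if cr < PySem.Int.floordiv H 2 then "Top"
  else if cr > PySem.Int.floordiv H 2 then "Bottom"
  else ""

-- the body of B's single loop over the seed list (state = (ones, shapes))
def pvBStep (H W : Nat)
    (st : PySem.Set (Int × Int) × List (List (String × String))) (seed : Int × Int) :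
    PySem.Set (Int × Int) × List (List (String × String)) :=
  if seed ∈ st.1 then
    let res := pvBFlood st.1 [seed] ⟨0, seed.1, seed.1, seed.2, seed.2⟩
    let s := res.2
    (res.1, st.2 ++ [[("Shape", pvBClassify s.cnt (s.bot - s.top + 1) (s.rgt - s.lft + 1)),
                      ("Location", pvBLoc (H : Int) (W : Int)
                        (PySem.Int.floordiv (s.top + s.bot) 2)
                        (PySem.Int.floordiv (s.lft + s.rgt) 2))]])
  else st

def identify_shapes_alt (result_grid : List (List Int)) : List (List (String × String)) :=
  let H := result_grid.length
  let W := (result_grid.headI).length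
  let cells := pvBCells result_grid H W
  (cells.foldl (pvBStep H W) (PySem.Set.ofList cells, [])).2

-- ===== PRECONDITION & SPEC =====
-- Pre_ excludes exactly the inputs on which A raises IndexError: grids with a row
-- shorter than the first row (the loop reads result_grid[row][col] for every
-- col < len(result_grid[0])).
def Pre_identify_shapes (result_grid : List (List Int)) : Prop :=
  ∀ row ∈ result_grid, (result_grid.headI).length ≤ row.length
instance (result_grid : List (List Int)) : Decidable (Pre_identify_shapes result_grid) := by
  unfold Pre_identify_shapes; infer_instance

def pvWitness_identify_shapes : List (List Int) := [[1, 0], [1, 1]]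

def Spec_identify_shapes (result_grid : List (List Int)) (out : List (List (String × String))) : Prop := out = identify_shapes_alt result_grid
instance (result_grid : List (List Int)) (out : List (List (String × String))) : Decidable (Spec_identify_shapes result_grid out) := by unfold Spec_identify_shapes; infer_instance

-- ===== CLAIM (what is proved, stated in full; the proofs are below) =====
def Claim_equal_identify_shapes : Prop := ∀ (result_grid : List (List Int)), Dom_identify_shapes result_grid → Pre_identify_shapes result_grid → Spec_identify_shapes result_grid (identify_shapes result_grid)

-- ===== LEMMAS AND PROOFS =====

-- the statistics accumulator step of B, as a function of one cluster element
def pvStep (acc : PvBStats) (p : Int × Int) : PvBStats :=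
  ⟨acc.cnt + 1,
   (if p.1 < acc.top then p.1 else acc.top),
   (if p.1 > acc.bot then p.1 else acc.bot),
   (if p.2 < acc.lft then p.2 else acc.lft),
   (if p.2 > acc.rgt then p.2 else acc.rgt)⟩

-- the invariant tying B's coordinate set to A's mutated grid
def pvInv (H W : Int) (g : List (List Int)) (S : PySem.Set (Int × Int)) : Prop :=
  ∀ p : Int × Int, p ∈ S ↔ (0 ≤ p.1 ∧ p.1 < H ∧ 0 ≤ p.2 ∧ p.2 < W ∧ pvCell g p.1 p.2 = 1)

theorem floodA_append (H W : Int) (g : List (List Int)) (stack cl : List (Int × Int)) :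
    floodA H W g stack cl =
      ((floodA H W g stack []).1, cl ++ (floodA H W g stack []).2) := by
  have main : ∀ (H W : Int) (g : List (List Int)) (stack cl : List (Int × Int)), ∀ k,
      floodA H W g stack k = ((floodA H W g stack []).1, k ++ (floodA H W g stack []).2) := by
    intro H W g stack cl
    induction g, stack, cl using floodA.induct (H := H) (W := W) with
    | case1 g cl => intro k; simp [floodA]
    | case2 g cl r c rest h ih =>
      intro k
      rw [floodA.eq_def]
      simp only [dif_pos h]
      conv_rhs => rw [floodA.eq_def]
      simp only [dif_pos h]
      simp only [List.nil_append]
      rw [ih, ih [(r, c)]]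
      simp
    | case3 g cl r c rest h ih =>
      intro k
      rw [floodA.eq_def]
      simp only [dif_neg h]
      conv_rhs => rw [floodA.eq_def]
      simp only [dif_neg h]
      exact ih k
  exact main H W g stack cl cl

theorem pvCell_set0_self (g : List (List Int)) (r c : Int) (h : pvCell g r c = 1) :
    pvCell (pvSet0 g r c) r c = 0 := by
  simp only [pvCell, pvSet0, List.getD] at *
  have hr : r.toNat < g.length := by
    by_contra hh
    rw [List.getElem?_eq_none (l := g) (by omega)] at h
    simp at h
  have hc : c.toNat < (g[r.toNat]?.getD []).length := by
    by_contra hh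
    rw [List.getElem?_eq_none (l := g[r.toNat]?.getD []) (by omega)] at h
    simp at h
  simp only [List.getElem?_set, hr, if_true, Option.getD_some]
  split_ifs
  all_goals simp

theorem pvCell_set0_ne (g : List (List Int)) (r c a b : Int)
    (hr : 0 ≤ r) (hc : 0 ≤ c) (ha : 0 ≤ a) (hb : 0 ≤ b) (hne : (a, b) ≠ (r, c)) :
    pvCell (pvSet0 g r c) a b = pvCell g a b := by
  simp only [pvCell, pvSet0, List.getD, List.getElem?_set]
  by_cases h1 : r.toNat = a.toNat
  · have hra : r = a := by omega
    subst hra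
    have hbc : b ≠ c := fun hh => hne (by rw [hh])
    have hcb : ¬ c.toNat = b.toNat := by omega
    by_cases h2 : r.toNat < g.length
    · rw [List.getElem?_eq_getElem h2]
      simp [h2, List.getElem?_set, hcb]
    · simp [h2, List.getElem?_eq_none (show g.length ≤ r.toNat by omega)]
  · rw [if_neg h1]

theorem pvInv_discard (H W : Int) (g : List (List Int)) (S : PySem.Set (Int × Int))
    (r c : Int) (h : 0 ≤ r ∧ r < H ∧ 0 ≤ c ∧ c < W ∧ pvCell g r c = 1)
    (hinv : pvInv H W g S) : pvInv H W (pvSet0 g r c) (PySem.Set.discard S (r, c)) := by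
  intro p
  rw [PySem.Set.mem_discard]
  constructor
  · rintro ⟨hpS, hpne⟩
    obtain ⟨h1, h2, h3, h4, h5⟩ := (hinv p).1 hpS
    refine ⟨h1, h2, h3, h4, ?_⟩
    rw [show p = (p.1, p.2) from rfl] at hpne
    rw [pvCell_set0_ne g r c p.1 p.2 h.1 h.2.2.1 h1 h3 hpne]
    exact h5
  · rintro ⟨h1, h2, h3, h4, h5⟩
    by_cases hpe : p = (r, c)
    · exfalso
      rw [hpe] at h5
      rw [pvCell_set0_self g r c h.2.2.2.2] at h5
      exact absurd h5 (by decide)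
    · refine ⟨(hinv p).2 ⟨h1, h2, h3, h4, ?_⟩, hpe⟩
      rw [show p = (p.1, p.2) from rfl] at hpe
      rw [← pvCell_set0_ne g r c p.1 p.2 h.1 h.2.2.1 h1 h3 hpe]
      exact h5

-- lockstep: B's set-based flood on the same stack consumes exactly A's cluster,
-- folding it through pvStep, and keeps the invariant to A's mutated grid
theorem pvBFlood_lockstep (H W : Int) :
    ∀ (g : List (List Int)) (stack cl : List (Int × Int))
      (S : PySem.Set (Int × Int)) (s0 : PvBStats),
      pvInv H W g S → S.Nodup →
      (pvBFlood S stack s0).2 =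
          (floodA H W g stack []).2.foldl pvStep s0 ∧
      pvInv H W (floodA H W g stack []).1 (pvBFlood S stack s0).1 ∧
      (pvBFlood S stack s0).1.Nodup ∧
      (∀ p, p ∈ (pvBFlood S stack s0).1 → p ∈ S) := by
  intro g stack cl
  induction g, stack, cl using floodA.induct (H := H) (W := W) with
  | case1 g cl =>
    intro S s0 hinv hnd
    exact ⟨by simp [floodA, pvBFlood], by simpa [floodA, pvBFlood] using hinv,
      by simpa [pvBFlood] using hnd, by simp [pvBFlood]⟩
  | case2 g cl r c rest h ih =>
    intro S s0 hinv hnd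
    have hmem : ((r, c) : Int × Int) ∈ S := (hinv (r, c)).2 h
    have hAstep : floodA H W g ((r, c) :: rest) [] =
        ((floodA H W (pvSet0 g r c)
            ((r, c + 1) :: (r, c - 1) :: (r + 1, c) :: (r - 1, c) :: rest) []).1,
          (r, c) :: (floodA H W (pvSet0 g r c)
            ((r, c + 1) :: (r, c - 1) :: (r + 1, c) :: (r - 1, c) :: rest) []).2) := by
      rw [floodA.eq_def]
      simp only [dif_pos h, List.nil_append]
      rw [floodA_append]
      simp
    rw [pvBFlood.eq_def]
    simp only [dif_pos hmem]
    rw [hAstep]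
    have hinv' := pvInv_discard H W g S r c h hinv
    have hnd' := PySem.Set.nodup_discard S (r, c) hnd
    obtain ⟨e1, e2, e3, e4⟩ := ih (PySem.Set.discard S (r, c))
      ⟨s0.cnt + 1, if r < s0.top then r else s0.top, if r > s0.bot then r else s0.bot,
        if c < s0.lft then c else s0.lft, if c > s0.rgt then c else s0.rgt⟩ hinv' hnd'
    refine ⟨?_, e2, e3, fun p hp => ?_⟩
    · rw [List.foldl_cons]
      rw [e1]
      simp [pvStep]
    · exact (PySem.Set.mem_discard S (r, c) p |>.1 (e4 p hp)).1
  | case3 g cl r c rest h ih =>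
    intro S s0 hinv hnd
    have hmem : ((r, c) : Int × Int) ∉ S := fun hm => h ((hinv (r, c)).1 hm)
    have hAstep : floodA H W g ((r, c) :: rest) [] = floodA H W g rest [] := by
      rw [floodA.eq_def]
      simp only [dif_neg h]
    rw [pvBFlood.eq_def]
    simp only [dif_neg hmem]
    rw [hAstep]
    exact ih S s0 hinv hnd

theorem foldl_pvStep (t : List (Int × Int)) (n a b c d : Int) :
    t.foldl pvStep ⟨n, a, b, c, d⟩ =
      ⟨n + t.length, (t.map Prod.fst).foldl min a, (t.map Prod.fst).foldl max b,
        (t.map Prod.snd).foldl min c, (t.map Prod.snd).foldl max d⟩ := by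
  induction t generalizing n a b c d with
  | nil => simp
  | cons p t ih =>
    simp only [List.foldl_cons, List.map_cons]
    have h1 : (if p.1 < a then p.1 else a) = min a p.1 := by omega
    have h2 : (if p.1 > b then p.1 else b) = max b p.1 := by omega
    have h3 : (if p.2 < c then p.2 else c) = min c p.2 := by omega
    have h4 : (if p.2 > d then p.2 else d) = max d p.2 := by omega
    simp only [pvStep, h1, h2, h3, h4]
    rw [ih]
    congr 1
    simp only [List.length_cons]
    push_cast
    omega

theorem pvCell_set0_or (g : List (List Int)) (r c a b : Int) :
    pvCell (pvSet0 g r c) a b = pvCell g a b ∨ pvCell (pvSet0 g r c) a b = 0 := by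
  simp only [pvCell, pvSet0, List.getD, List.getElem?_set]
  by_cases h1 : r.toNat = a.toNat
  · by_cases h2 : r.toNat < g.length
    · simp only [if_pos h1, if_pos h2, Option.getD_some, List.getElem?_set]
      by_cases h3 : c.toNat = b.toNat
      · right
        simp only [if_pos h3]
        split_ifs <;> simp
      · left
        simp [if_neg h3, h1]
    · simp only [if_pos h1, if_neg h2]
      right
      rfl
  · left
    rw [if_neg h1]

theorem floodA_nodup (H W : Int) (g : List (List Int)) (stack cl : List (Int × Int))
    (hnd : cl.Nodup) (hinv : ∀ p ∈ cl, pvCell g p.1 p.2 ≠ 1) :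
    ((floodA H W g stack cl).2).Nodup := by
  induction g, stack, cl using floodA.induct (H := H) (W := W) with
  | case1 g cl => simpa [floodA] using hnd
  | case2 g cl r c rest h ih =>
    rw [floodA.eq_def]
    simp only [dif_pos h]
    apply ih
    · simp only [List.nodup_append, List.nodup_cons, List.nodup_nil]
      refine ⟨hnd, by simp, ?_⟩
      intro p hp q hq
      rw [List.mem_singleton] at hq
      subst hq
      intro he
      subst he
      exact hinv _ hp (by simpa using h.2.2.2.2)
    · intro p hp
      rcases List.mem_append.1 hp with hp | hp
      · rcases pvCell_set0_or g r c p.1 p.2 with he | he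
        · rw [he]; exact hinv _ hp
        · rw [he]; decide
      · simp at hp
        subst hp
        simp [pvCell_set0_self g r c h.2.2.2.2]
  | case3 g cl r c rest h ih =>
    rw [floodA.eq_def]
    simp only [dif_neg h]
    exact ih hnd hinv

theorem foldl_upd_length (mr mc : Int) (cl : List (Int × Int)) (B : List (List Int)) :
    (cl.foldl (pvCGupd mr mc) B).length = B.length := by
  induction cl generalizing B with
  | nil => rfl
  | cons p t ih => simp [List.foldl_cons, ih, pvCGupd]

theorem foldl_upd_row_length (mr mc : Int) (cl : List (Int × Int)) (B : List (List Int)) (i : Nat) :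
    ((cl.foldl (pvCGupd mr mc) B).getD i []).length = (B.getD i []).length := by
  induction cl generalizing B with
  | nil => rfl
  | cons p t ih =>
    rw [List.foldl_cons, ih]
    simp only [pvCGupd, List.getD, List.getElem?_set]
    split_ifs with h1 h2
    · subst h1; simp [List.getElem?_eq_getElem h2]
    · simp [List.getElem?_eq_none (by omega : B.length ≤ i)]
    · rfl

theorem upd_get (mr mc : Int) (B : List (List Int)) (p : Int × Int) (i j : Nat)
    (hr : (p.1 - mr).toNat < B.length)
    (hc : (p.2 - mc).toNat < (B.getD (p.1 - mr).toNat []).length) :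
    ((pvCGupd mr mc B p).getD i []).getD j 0 =
      if (p.1 - mr).toNat = i ∧ (p.2 - mc).toNat = j then 1
      else (B.getD i []).getD j 0 := by
  simp only [pvCGupd, List.getD, List.getElem?_set]
  by_cases h1 : (p.1 - mr).toNat = i
  · subst h1
    simp only [if_pos hr]
    by_cases h2 : (p.2 - mc).toNat = j
    · subst h2
      simp only [List.getD] at hc ⊢
      simp [hc]
    · simp [h2]
  · simp [h1]

theorem foldl_upd_get (mr mc : Int) (cl : List (Int × Int)) (B : List (List Int)) (i j : Nat)
    (hcl : ∀ p ∈ cl, (p.1 - mr).toNat < B.length ∧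
      (p.2 - mc).toNat < (B.getD (p.1 - mr).toNat []).length) :
    ((cl.foldl (pvCGupd mr mc) B).getD i []).getD j 0 =
      if ∃ p ∈ cl, (p.1 - mr).toNat = i ∧ (p.2 - mc).toNat = j then 1
      else (B.getD i []).getD j 0 := by
  induction cl generalizing B with
  | nil => simp
  | cons p t ih =>
    have hr := (hcl p (by simp)).1
    have hc := (hcl p (by simp)).2
    have hB' : ∀ q ∈ t, (q.1 - mr).toNat < (pvCGupd mr mc B p).length ∧
        (q.2 - mc).toNat < ((pvCGupd mr mc B p).getD (q.1 - mr).toNat []).length := by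
      intro q hq
      have h2 := foldl_upd_row_length mr mc [p] B (q.1 - mr).toNat
      simp only [List.foldl_cons, List.foldl_nil] at h2
      refine ⟨?_, ?_⟩
      · simpa [pvCGupd, List.length_set] using (hcl q (by simp [hq])).1
      · rw [h2]; exact (hcl q (by simp [hq])).2
    rw [List.foldl_cons, ih (pvCGupd mr mc B p) hB']
    rw [upd_get mr mc B p i j hr hc]
    by_cases ht : ∃ q ∈ t, (q.1 - mr).toNat = i ∧ (q.2 - mc).toNat = j
    · rw [if_pos ht, if_pos (show ∃ q ∈ p :: t, _ by
        rcases ht with ⟨q, hq, h2⟩; exact ⟨q, List.mem_cons_of_mem _ hq, h2⟩)]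
    · rw [if_neg ht]
      by_cases hp : (p.1 - mr).toNat = i ∧ (p.2 - mc).toNat = j
      · rw [if_pos hp, if_pos ⟨p, by simp, hp⟩]
      · rw [if_neg hp, if_neg ?hn]
        case hn =>
          rintro ⟨q, hq, h2⟩
          rcases List.mem_cons.1 hq with rfl | hq
          · exact hp h2
          · exact ht ⟨q, hq, h2⟩

theorem cg_shape (mr mc : Int) (R C : Nat) (cl : List (Int × Int)) :
    (pvBuildCG mr mc R C cl).length = R ∧
      ∀ i : Nat, ((pvBuildCG mr mc R C cl).getD i []).length = if i < R then C else 0 := by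
  constructor
  · rw [pvBuildCG, foldl_upd_length]; simp
  · intro i
    rw [pvBuildCG, foldl_upd_row_length]
    split_ifs with h
    · rw [List.getD_eq_getElem _ _ (by simpa using h)]
      simp
    · rw [List.getD_eq_default _ _ (by simpa using h)]
      rfl

theorem cg_cell (mr Mr mc Mc : Int) (cl : List (Int × Int))
    (hb : ∀ p ∈ cl, mr ≤ p.1 ∧ p.1 ≤ Mr ∧ mc ≤ p.2 ∧ p.2 ≤ Mc) (i j : Nat)
    (hi : i < (Mr - mr + 1).toNat) (hj : j < (Mc - mc + 1).toNat) :
    ((pvBuildCG mr mc (Mr - mr + 1).toNat (Mc - mc + 1).toNat cl).getD i []).getD j 0 =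
      if (mr + (i : Int), mc + (j : Int)) ∈ cl then 1 else 0 := by
  have hcl : ∀ p ∈ cl, (p.1 - mr).toNat < (List.replicate (Mr - mr + 1).toNat (List.replicate (Mc - mc + 1).toNat (0:Int))).length ∧
      (p.2 - mc).toNat < ((List.replicate (Mr - mr + 1).toNat (List.replicate (Mc - mc + 1).toNat (0:Int))).getD (p.1 - mr).toNat []).length := by
    intro p hp
    obtain ⟨h1, h2, h3, h4⟩ := hb p hp
    have hr : (p.1 - mr).toNat < (Mr - mr + 1).toNat := by omega
    refine ⟨by simpa using hr, ?_⟩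
    rw [List.getD_eq_getElem _ _ (by simpa using hr)]
    simp
    omega
  rw [pvBuildCG, foldl_upd_get mr mc cl _ i j hcl]
  have hmem : (∃ p ∈ cl, (p.1 - mr).toNat = i ∧ (p.2 - mc).toNat = j) ↔
      (mr + (i : Int), mc + (j : Int)) ∈ cl := by
    constructor
    · rintro ⟨p, hp, h1, h2⟩
      obtain ⟨b1, b2, b3, b4⟩ := hb p hp
      have : p = (mr + (i : Int), mc + (j : Int)) := by
        ext <;> simp <;> omega
      rwa [← this]
    · intro hp
      exact ⟨_, hp, by simp, by simp⟩
  rw [if_congr hmem rfl rfl]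
  split_ifs with h
  · rfl
  · have h1 : (List.replicate (Mr - mr + 1).toNat (List.replicate (Mc - mc + 1).toNat (0:Int))).getD i [] =
        List.replicate (Mc - mc + 1).toNat 0 := by
      rw [List.getD_eq_getElem _ _ (by simpa using hi)]
      simp
    rw [h1, List.getD_eq_getElem _ _ (by simpa using hj)]
    simp

theorem rect_iff (cl : List (Int × Int)) (mr Mr mc Mc : Int)
    (hnd : cl.Nodup)
    (hb : ∀ p ∈ cl, mr ≤ p.1 ∧ p.1 ≤ Mr ∧ mc ≤ p.2 ∧ p.2 ≤ Mc)
    (hrm : mr ≤ Mr) (hcm : mc ≤ Mc) :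
    (pvIsRectA (pvBuildCG mr mc (Mr - mr + 1).toNat (Mc - mc + 1).toNat cl) = true) ↔
      ((cl.length : Int) = (Mr - mr + 1) * (Mc - mc + 1)) := by
  have hRC : (Mr - mr + 1).toNat = (Mr + 1 - mr).toNat ∧ (Mc - mc + 1).toNat = (Mc + 1 - mc).toNat := by omega
  set R := (Mr - mr + 1).toNat with hR
  set C := (Mc - mc + 1).toNat with hC
  set cg := pvBuildCG mr mc R C cl with hcg
  obtain ⟨hlen, hrowlen⟩ := cg_shape mr mc R C cl
  rw [← hcg] at hlen hrowlen
  have hRpos : 0 < R := by omega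
  have hCpos : 0 < C := by omega
  have e1 : ((R : Nat) : Int) = Mr - mr + 1 := by omega
  have e2 : ((C : Nat) : Int) = Mc - mc + 1 := by omega
  have hcols : cg.headI.length = C := by
    have h0 : ((pvBuildCG mr mc R C cl).getD 0 []).length = C := by
      rw [hrowlen]; simp [hRpos]
    rw [← hcg] at h0
    cases hh : cg with
    | nil =>
      exfalso
      rw [hh] at hlen
      simp at hlen
      omega
    | cons x t => rw [hh] at h0; simpa using h0
  have hcell : ∀ i < R, ∀ j < C, ((cg.getD i []).getD j 0) =
      if (mr + (i : Int), mc + (j : Int)) ∈ cl then 1 else 0 :=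
    fun i hi j hj => cg_cell mr Mr mc Mc cl hb i j hi hj
  have hcolsum : ∀ j < C, pvSum ((List.range R).map fun i => (cg.getD i []).getD j 0) =
      (((List.range R).countP fun i : Nat => decide ((mr + (i : Int), mc + (j : Int)) ∈ cl)) : Int) := by
    intro j hj
    rw [pvSum, ← List.sum_eq_foldl,
      List.map_congr_left (fun i hi => hcell i (List.mem_range.mp hi) j hj)]
    exact PySem.List.sum_map_ite_one_zero' _ _
  have hfullA : (pvIsRectA cg = true) ↔ (∀ i < R, ∀ j < C, (mr + (i : Int), mc + (j : Int)) ∈ cl) := by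
    rw [pvIsRectA]
    simp only [hlen, hcols, Bool.and_eq_true, List.all_eq_true, List.mem_range, beq_iff_eq]
    constructor
    · rintro ⟨_, h2⟩ i hi j hj
      have := h2 j hj
      rw [hcolsum j hj] at this
      have hcnt : (List.range R).countP (fun i : Nat => decide ((mr + (i : Int), mc + (j : Int)) ∈ cl)) = (List.range R).length := by
        rw [List.length_range]
        exact_mod_cast this
      have hall := List.countP_eq_length.mp hcnt
      simpa using hall i (List.mem_range.mpr hi)
    · intro hfull
      have hrow1 : ∀ i < R, cg.getD i [] = List.replicate C 1 := by
        intro i hi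
        rw [List.eq_replicate_iff]
        refine ⟨by rw [hrowlen]; simp [hi], ?_⟩
        intro b hbmem
        obtain ⟨k, hk, hbk⟩ := List.mem_iff_getElem.mp hbmem
        have hkC : k < C := by
          have := hrowlen i
          rw [if_pos hi] at this
          omega
        have := hcell i hi k hkC
        rw [List.getD_eq_getElem _ _ hk, hbk, if_pos (hfull i hi k hkC)] at this
        exact this
      constructor
      · intro i hi
        rw [hrow1 i hi, hrow1 0 hRpos]
      · intro j hj
        rw [hcolsum j hj]
        have : (List.range R).countP (fun i : Nat => decide ((mr + (i : Int), mc + (j : Int)) ∈ cl)) = R := by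
          rw [List.countP_eq_length.mpr]
          · simp
          · intro i hi
            simp [hfull i (List.mem_range.mp hi) j hj]
        rw [this]
  rw [hfullA]
  -- counting: the cluster is the full bbox iff its size equals the bbox area
  classical
  have hS : cl.toFinset.card = cl.length := List.toFinset_card_of_nodup hnd
  have hsub : cl.toFinset ⊆ Finset.Icc mr Mr ×ˢ Finset.Icc mc Mc := by
    intro x hx
    obtain ⟨h1, h2, h3, h4⟩ := hb x (List.mem_toFinset.mp hx)
    simp [Finset.mem_product, Finset.mem_Icc]
    omega
  have hT : (Finset.Icc mr Mr ×ˢ Finset.Icc mc Mc).card = R * C := by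
    rw [Finset.card_product, Int.card_Icc, Int.card_Icc]
    congr 1 <;> omega
  constructor
  · intro hfull
    have hTsub : Finset.Icc mr Mr ×ˢ Finset.Icc mc Mc ⊆ cl.toFinset := by
      intro x hxT
      rw [Finset.mem_product, Finset.mem_Icc, Finset.mem_Icc] at hxT
      have hi : (x.1 - mr).toNat < R := by omega
      have hj : (x.2 - mc).toNat < C := by omega
      have := hfull _ hi _ hj
      have hx : (mr + ((x.1 - mr).toNat : Int), mc + ((x.2 - mc).toNat : Int)) = x := by
        ext <;> simp <;> omega
      rw [hx] at this
      exact List.mem_toFinset.mpr this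
    have heq : cl.toFinset = Finset.Icc mr Mr ×ˢ Finset.Icc mc Mc :=
      Finset.Subset.antisymm hsub hTsub
    have : cl.length = R * C := by rw [← hS, heq, hT]
    rw [this]
    push_cast
    rw [e1, e2]
  · intro hcard
    have hcards : cl.toFinset.card = (Finset.Icc mr Mr ×ˢ Finset.Icc mc Mc).card := by
      rw [hS, hT]
      have : (cl.length : Int) = ((R * C : Nat) : Int) := by
        rw [hcard]
        push_cast
        rw [e1, e2]
      exact_mod_cast this
    have heq : cl.toFinset = Finset.Icc mr Mr ×ˢ Finset.Icc mc Mc :=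
      Finset.eq_of_subset_of_card_le hsub (le_of_eq hcards.symm)
    intro i hi j hj
    have hmemT : (mr + (i : Int), mc + (j : Int)) ∈ Finset.Icc mr Mr ×ˢ Finset.Icc mc Mc := by
      rw [Finset.mem_product, Finset.mem_Icc, Finset.mem_Icc]
      omega
    rw [← heq] at hmemT
    exact List.mem_toFinset.mp hmemT

theorem loc_eq (H W cr cc : Int) : pvLocA H W cr cc = pvBLoc H W cr cc := by
  rw [pvLocA, pvBLoc]
  split_ifs <;> decide

theorem classify_eq (cl : List (Int × Int)) (mr Mr mc Mc : Int)
    (hnd : cl.Nodup)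
    (hb : ∀ p ∈ cl, mr ≤ p.1 ∧ p.1 ≤ Mr ∧ mc ≤ p.2 ∧ p.2 ≤ Mc)
    (hrm : mr ≤ Mr) (hcm : mc ≤ Mc) :
    pvClassifyA (pvBuildCG mr mc (Mr - mr + 1).toNat (Mc - mc + 1).toNat cl) =
      pvBClassify (cl.length : Int) (Mr - mr + 1) (Mc - mc + 1) := by
  have hrect := rect_iff cl mr Mr mc Mc hnd hb hrm hcm
  set R := (Mr - mr + 1).toNat with hR
  set C := (Mc - mc + 1).toNat with hC
  set cg := pvBuildCG mr mc R C cl with hcg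
  obtain ⟨hlen, hrowlen⟩ := cg_shape mr mc R C cl
  rw [← hcg] at hlen hrowlen
  have hRpos : 0 < R := by omega
  have hCpos : 0 < C := by omega
  have hcols : cg.headI.length = C := by
    have h0 : (cg.getD 0 []).length = C := by
      rw [hrowlen]; simp [hRpos]
    cases hh : cg with
    | nil =>
      exfalso
      rw [hh] at hlen
      simp at hlen
      omega
    | cons x t => rw [hh] at h0; simpa using h0
  rw [pvClassifyA, pvBClassify, hlen, hcols]
  simp only [← hrect]
  split_ifs <;> first | rfl | omega

theorem pvMin1_le (x : Int) (l : List Int) : ∀ y ∈ x :: l, pvMin1 (x :: l) ≤ y := by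
  intro y hy
  rcases List.mem_cons.1 hy with rfl | hy
  · exact (PySem.List.foldl_min_le l y).1
  · exact (PySem.List.foldl_min_le l x).2 y hy

theorem pvMax1_ge (x : Int) (l : List Int) : ∀ y ∈ x :: l, y ≤ pvMax1 (x :: l) := by
  intro y hy
  rcases List.mem_cons.1 hy with rfl | hy
  · exact (PySem.List.le_foldl_max l y).1
  · exact (PySem.List.le_foldl_max l x).2 y hy

-- one guarded cell: A's body on (g, out) and B's body on (S, out) append the same
-- shape row and re-establish the invariant
theorem cell_eq (H W : Nat) (g : List (List Int)) (S : PySem.Set (Int × Int))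
    (out : List (List (String × String))) (row col : Nat)
    (hrow : row < H) (hcol : col < W)
    (hinv : pvInv (H : Int) (W : Int) g S) (hnd : S.Nodup)
    (hmem : (((row : Nat) : Int), ((col : Nat) : Int)) ∈ S) :
    pvInnerA H W (g, out) row col =
      ((pvInnerA H W (g, out) row col).1, (pvBStep H W (S, out) ((row : Int), (col : Int))).2) ∧
    pvInv (H : Int) (W : Int) (pvInnerA H W (g, out) row col).1
      (pvBStep H W (S, out) ((row : Int), (col : Int))).1 ∧
    (pvBStep H W (S, out) ((row : Int), (col : Int))).1.Nodup ∧
    (∀ p, p ∈ (pvBStep H W (S, out) ((row : Int), (col : Int))).1 → p ∈ S) := by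
  have hg : 0 ≤ ((row : Nat) : Int) ∧ ((row : Nat) : Int) < (H : Int) ∧
      0 ≤ ((col : Nat) : Int) ∧ ((col : Nat) : Int) < (W : Int) ∧
      pvCell g ((row : Nat) : Int) ((col : Nat) : Int) = 1 :=
    (hinv _).1 hmem
  have hcv : (g.getD row []).getD col 0 = 1 := by
    simpa [pvCell] using hg.2.2.2.2
  obtain ⟨lock1, lock2, lock3, lock4⟩ := pvBFlood_lockstep (H : Int) (W : Int) g
    [((row : Int), (col : Int))] [] S ⟨0, (row : Int), (row : Int), (col : Int), (col : Int)⟩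
    hinv hnd
  rw [pvInnerA, pvBStep]
  simp only [if_pos hcv, if_pos hmem]
  have hA : floodA (H : Int) (W : Int) g [((row : Int), (col : Int))] [] =
      ((floodA (H : Int) (W : Int) (pvSet0 g row col)
          [((row : Int), (col : Int) + 1), ((row : Int), (col : Int) - 1),
           ((row : Int) + 1, (col : Int)), ((row : Int) - 1, (col : Int))] []).1,
        ((row : Int), (col : Int)) ::
          (floodA (H : Int) (W : Int) (pvSet0 g row col)
            [((row : Int), (col : Int) + 1), ((row : Int), (col : Int) - 1),
             ((row : Int) + 1, (col : Int)), ((row : Int) - 1, (col : Int))] []).2) := by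
    rw [floodA.eq_def]
    simp only [dif_pos hg, List.nil_append]
    rw [floodA_append]
    simp
  set t := (floodA (H : Int) (W : Int) (pvSet0 g row col)
      [((row : Int), (col : Int) + 1), ((row : Int), (col : Int) - 1),
       ((row : Int) + 1, (col : Int)), ((row : Int) - 1, (col : Int))] []).2 with ht
  -- the cluster and its invariants
  have hndc : (((row : Int), (col : Int)) :: t).Nodup := by
    have h0 := floodA_nodup (H : Int) (W : Int) g [((row : Int), (col : Int))] []
      (by simp) (by simp)
    rw [hA] at h0
    exact h0
  have hmins : ∀ p ∈ ((row : Int), (col : Int)) :: t,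
      pvMin1 ((((row : Int), (col : Int)) :: t).map Prod.fst) ≤ p.1 ∧
      p.1 ≤ pvMax1 ((((row : Int), (col : Int)) :: t).map Prod.fst) ∧
      pvMin1 ((((row : Int), (col : Int)) :: t).map Prod.snd) ≤ p.2 ∧
      p.2 ≤ pvMax1 ((((row : Int), (col : Int)) :: t).map Prod.snd) := by
    intro p hp
    exact ⟨pvMin1_le _ _ _ (List.mem_map_of_mem hp),
      pvMax1_ge _ _ _ (List.mem_map_of_mem hp),
      pvMin1_le _ _ _ (List.mem_map_of_mem (f := Prod.snd) hp),
      pvMax1_ge _ _ _ (List.mem_map_of_mem (f := Prod.snd) hp)⟩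
  have hmem0 : (((row : Int), (col : Int))) ∈ (((row : Int), (col : Int)) :: t) := by simp
  have hrm : pvMin1 ((((row : Int), (col : Int)) :: t).map Prod.fst) ≤
      pvMax1 ((((row : Int), (col : Int)) :: t).map Prod.fst) :=
    le_trans (hmins _ hmem0).1 (hmins _ hmem0).2.1
  have hcm : pvMin1 ((((row : Int), (col : Int)) :: t).map Prod.snd) ≤
      pvMax1 ((((row : Int), (col : Int)) :: t).map Prod.snd) :=
    le_trans (hmins _ hmem0).2.2.1 (hmins _ hmem0).2.2.2
  have hstats : (pvBFlood S [((row : Int), (col : Int))]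
      ⟨0, (row : Int), (row : Int), (col : Int), (col : Int)⟩).2 =
      ⟨1 + (t.length : Int), (t.map Prod.fst).foldl min (row : Int),
        (t.map Prod.fst).foldl max (row : Int), (t.map Prod.snd).foldl min (col : Int),
        (t.map Prod.snd).foldl max (col : Int)⟩ := by
    rw [lock1, hA]
    simp only [List.foldl_cons]
    have hstep : pvStep ⟨0, (row : Int), (row : Int), (col : Int), (col : Int)⟩
        ((row : Int), (col : Int)) =
        ⟨1, (row : Int), (row : Int), (col : Int), (col : Int)⟩ := by
      simp [pvStep]
    rw [hstep, foldl_pvStep]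
  refine ⟨?_, ?_, lock3, lock4⟩
  · rw [hA]
    simp only [hstats]
    have hcl := classify_eq (((row : Int), (col : Int)) :: t)
      (pvMin1 ((((row : Int), (col : Int)) :: t).map Prod.fst))
      (pvMax1 ((((row : Int), (col : Int)) :: t).map Prod.fst))
      (pvMin1 ((((row : Int), (col : Int)) :: t).map Prod.snd))
      (pvMax1 ((((row : Int), (col : Int)) :: t).map Prod.snd))
      hndc (fun p hp => hmins p hp) hrm hcm
    simp only [List.map_cons, pvMin1, pvMax1, List.length_cons] at hcl
    have hc2 : ((t.length + 1 : Nat) : Int) = 1 + (t.length : Int) := by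
      push_cast
      ring
    rw [hc2] at hcl
    simp only [List.map_cons, pvMin1, pvMax1, hcl, loc_eq]
  · exact lock2

-- the outer loop, walked simultaneously: A visits every cell, B only the cells of
-- the filtered seed list; cells outside the filter are never in B's set
theorem outer_eq (H W : Nat) (P : Int × Int → Bool) :
    ∀ (L : List (Nat × Nat)) (g : List (List Int)) (S : PySem.Set (Int × Int))
      (out : List (List (String × String))),
      (∀ q ∈ L, q.1 < H ∧ q.2 < W) →
      pvInv (H : Int) (W : Int) g S → S.Nodup → (∀ p ∈ S, P p = true) →
      (L.foldl (fun st q => pvInnerA H W st q.1 q.2) (g, out)).2 =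
        ((L.filter (fun q => P ((q.1 : Int), (q.2 : Int)))).foldl
          (fun st q => pvBStep H W st ((q.1 : Int), (q.2 : Int))) (S, out)).2 := by
  intro L
  induction L with
  | nil => intro g S out _ _ _ _; simp
  | cons q L ih =>
    intro g S out hL hinv hnd hP
    have hq := hL q (by simp)
    have hL' : ∀ q' ∈ L, q'.1 < H ∧ q'.2 < W := fun q' hq' => hL q' (by simp [hq'])
    by_cases hPq : P ((q.1 : Int), (q.2 : Int)) = true
    · simp only [List.filter_cons, hPq, if_true, List.foldl_cons]
      by_cases hmem : (((q.1 : Nat) : Int), ((q.2 : Nat) : Int)) ∈ S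
      · obtain ⟨c1, c2, c3, c4⟩ := cell_eq H W g S out q.1 q.2 hq.1 hq.2 hinv hnd hmem
        rw [c1]
        have hout : pvInnerA H W (g, out) q.1 q.2 =
            ((pvInnerA H W (g, out) q.1 q.2).1,
              (pvBStep H W (S, out) ((q.1 : Int), (q.2 : Int))).2) := c1
        rw [show pvBStep H W (S, out) ((q.1 : Int), (q.2 : Int)) =
              ((pvBStep H W (S, out) ((q.1 : Int), (q.2 : Int))).1,
                (pvBStep H W (S, out) ((q.1 : Int), (q.2 : Int))).2) from rfl]
        exact ih _ _ _ hL' c2 c3 (fun p hp => hP p (c4 p hp))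
      · have hguard : ¬ (g.getD q.1 []).getD q.2 0 = 1 := by
          intro hcv
          apply hmem
          apply (hinv _).2
          refine ⟨by exact Int.natCast_nonneg _, by exact Int.ofNat_lt.mpr hq.1,
            by exact Int.natCast_nonneg _, by exact Int.ofNat_lt.mpr hq.2, ?_⟩
          show pvCell g (q.1 : Int) (q.2 : Int) = 1
          simpa [pvCell] using hcv
        have hA : pvInnerA H W (g, out) q.1 q.2 = (g, out) := by
          rw [pvInnerA, if_neg hguard]
        have hB : pvBStep H W (S, out) ((q.1 : Int), (q.2 : Int)) = (S, out) := by
          rw [pvBStep, if_neg hmem]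
        rw [hA, hB]
        exact ih _ _ _ hL' hinv hnd hP
    · simp only [List.filter_cons, if_neg hPq]
      have hmem : (((q.1 : Nat) : Int), ((q.2 : Nat) : Int)) ∉ S := fun hm => hPq (hP _ hm)
      have hguard : ¬ (g.getD q.1 []).getD q.2 0 = 1 := by
        intro hcv
        apply hmem
        apply (hinv _).2
        refine ⟨by exact Int.natCast_nonneg _, by exact Int.ofNat_lt.mpr hq.1,
          by exact Int.natCast_nonneg _, by exact Int.ofNat_lt.mpr hq.2, ?_⟩
        show pvCell g (q.1 : Int) (q.2 : Int) = 1
        simpa [pvCell] using hcv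
      simp only [List.foldl_cons]
      have hA : pvInnerA H W (g, out) q.1 q.2 = (g, out) := by
        rw [pvInnerA, if_neg hguard]
      rw [hA]
      exact ih _ _ _ hL' hinv hnd hP
-- ===== VERDICT (by name: the statement is the Claim_ definition above) =====
theorem identify_shapes_spec : Claim_equal_identify_shapes := by
  intro g _ _
  simp only [Spec_identify_shapes, identify_shapes, identify_shapes_alt]
  set H := g.length with hH
  set W := g.headI.length with hW
  set P : Int × Int → Bool := fun p => (g.getD p.1.toNat []).getD p.2.toNat 0 == 1 with hP
  set cellL : List (Nat × Nat) :=
    (List.range H).flatMap (fun r => (List.range W).map (fun c => (r, c))) with hcellL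
  -- A's nested fold is the flat fold over the row-major cell list
  have hAfold : (List.range H).foldl
      (fun st row => (List.range W).foldl (fun st col => pvInnerA H W st row col) st)
      (g, ([] : List (List (String × String)))) =
      cellL.foldl (fun st q => pvInnerA H W st q.1 q.2) (g, []) := by
    rw [hcellL, List.foldl_flatMap]
    congr 1
    funext st row
    rw [List.foldl_map]
  -- B's seed list is the row-major cell list filtered by "initially 1"
  have hcells : pvBCells g H W =
      (cellL.filter (fun q => P ((q.1 : Int), (q.2 : Int)))).map
        (fun q : Nat × Nat => ((q.1 : Int), (q.2 : Int))) := by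
    rw [hcellL]
    simp only [pvBCells, List.filter_flatMap, List.map_flatMap]
    apply List.flatMap_congr
    intro r _
    rw [List.filter_map, List.map_map]
    have hfil : List.filter ((fun q : Nat × Nat => P ((q.1 : Int), (q.2 : Int))) ∘ fun c => (r, c))
        (List.range W) = List.filter (fun c : Nat => (g.getD r []).getD c 0 == 1) (List.range W) := by
      apply List.filter_congr
      intro c _
      simp [hP]
    rw [hfil]
    apply List.map_congr_left
    intro c _
    rfl
  -- membership in the seed list
  have hmemcells : ∀ p : Int × Int, p ∈ pvBCells g H W ↔
      (0 ≤ p.1 ∧ p.1 < (H : Int) ∧ 0 ≤ p.2 ∧ p.2 < (W : Int) ∧ pvCell g p.1 p.2 = 1) := by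
    intro p
    simp only [pvBCells, List.mem_flatMap, List.mem_map, List.mem_filter, List.mem_range,
      beq_iff_eq]
    constructor
    · rintro ⟨r, hr, c, ⟨hc, hv⟩, rfl⟩
      refine ⟨by exact Int.natCast_nonneg _, by exact Int.ofNat_lt.mpr hr,
        by exact Int.natCast_nonneg _, by exact Int.ofNat_lt.mpr hc, ?_⟩
      show pvCell g (r : Int) (c : Int) = 1
      simpa [pvCell] using hv
    · rintro ⟨h1, h2, h3, h4, h5⟩
      refine ⟨p.1.toNat, by omega, p.2.toNat, ⟨by omega, by simpa [pvCell] using h5⟩, ?_⟩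
      ext <;> simp <;> omega
  have hinv0 : pvInv (H : Int) (W : Int) g (PySem.Set.ofList (pvBCells g H W)) := by
    intro p
    rw [PySem.Set.mem_ofList]
    exact hmemcells p
  have hP0 : ∀ p ∈ PySem.Set.ofList (pvBCells g H W), P p = true := by
    intro p hp
    obtain ⟨_, _, _, _, h5⟩ := (hinv0 p).1 hp
    simp only [hP, beq_iff_eq]
    simpa [pvCell] using h5
  have hL0 : ∀ q ∈ cellL, q.1 < H ∧ q.2 < W := by
    intro q hq
    rw [hcellL] at hq
    simp only [List.mem_flatMap, List.mem_map, List.mem_range] at hq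
    obtain ⟨r, hr, c, hc, rfl⟩ := hq
    exact ⟨hr, hc⟩
  have houter := outer_eq H W P cellL g (PySem.Set.ofList (pvBCells g H W)) []
    hL0 hinv0 (PySem.Set.nodup_ofList _) hP0
  rw [hAfold, houter, hcells, List.foldl_map]
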